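-- pv_equiv track=rewrite | github.com/dotzo/AdventOfCode2020 | AdventOfCode2020/Day-17.py | max_dim_4D
-- ===== SOURCE A (Python) =====
-- def max_dim_4D(space):
--     mx, my, mz, mw = 0, 0, 0, 0
--     for (x,y,z,w), v in space.items():
--         if v == '.':
--             continue
--         if x > mx:
--             mx = x
--         if y > my:
--             my = y
--         if z > mz:
--             mz = z
--         if w > mw:
--             mw = w
--
--     return mx, my, mz, mw
-- ===== SOURCE B (Python) =====
-- def max_dim_4D(space):
--     active = [k for k, v in space.items() if v != '.']
--     return tuple(max([0] + [c[i] for c in active]) for i in range(4))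
-- ===== Notes on version B (the rewrite author's own statement) =====
-- stated objective: simpler
-- what changed: Instead of one loop threading four running maxima with per-axis if-updates, B first filters the active coordinates and then takes each axis maximum (seeded at 0) in its own max() pass.
import Mathlib
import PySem

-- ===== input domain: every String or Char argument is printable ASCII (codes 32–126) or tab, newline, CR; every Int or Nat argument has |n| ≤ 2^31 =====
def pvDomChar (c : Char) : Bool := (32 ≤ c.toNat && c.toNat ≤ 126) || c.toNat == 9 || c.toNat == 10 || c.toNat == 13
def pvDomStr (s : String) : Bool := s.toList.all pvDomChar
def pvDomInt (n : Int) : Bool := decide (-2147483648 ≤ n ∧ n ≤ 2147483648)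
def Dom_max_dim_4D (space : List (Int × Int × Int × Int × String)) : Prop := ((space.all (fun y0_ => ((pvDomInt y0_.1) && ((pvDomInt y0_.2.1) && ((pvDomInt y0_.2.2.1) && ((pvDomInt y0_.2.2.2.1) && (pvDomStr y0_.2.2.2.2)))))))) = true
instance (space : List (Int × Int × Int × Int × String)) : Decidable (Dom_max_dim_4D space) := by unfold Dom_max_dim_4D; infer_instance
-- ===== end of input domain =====

-- ===== PORT A =====
-- mx,my,mz,mw start at 0; each active cell (v ≠ ".") updates each axis with its own `if`
def max_dim_4D (space : List (Int × Int × Int × Int × String)) : Int × Int × Int × Int :=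
  space.foldl (fun m t =>
    if t.2.2.2.2 == "." then m
    else
      ((if t.1 > m.1 then t.1 else m.1),
       (if t.2.1 > m.2.1 then t.2.1 else m.2.1),
       (if t.2.2.1 > m.2.2.1 then t.2.2.1 else m.2.2.1),
       (if t.2.2.2.1 > m.2.2.2 then t.2.2.2.1 else m.2.2.2)))
    (0, 0, 0, 0)

-- ===== PORT B =====
-- B: filter the active coordinates, then one max-pass per axis seeded at 0
def axisMax (l : List Int) : Int := l.foldl max 0

def max_dim_4D_alt (space : List (Int × Int × Int × Int × String)) : Int × Int × Int × Int :=
  let active := (space.filter (fun t => t.2.2.2.2 ≠ ".")).map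
    (fun t => (t.1, t.2.1, t.2.2.1, t.2.2.2.1))
  (axisMax (active.map (·.1)), axisMax (active.map (·.2.1)),
   axisMax (active.map (·.2.2.1)), axisMax (active.map (·.2.2.2)))

-- ===== PRECONDITION & SPEC =====
def Spec_max_dim_4D (space : List (Int × Int × Int × Int × String)) (out : Int × Int × Int × Int) : Prop := out = max_dim_4D_alt space
instance (space : List (Int × Int × Int × Int × String)) (out : Int × Int × Int × Int) : Decidable (Spec_max_dim_4D space out) := by unfold Spec_max_dim_4D; infer_instance

-- ===== CLAIM (what is proved, stated in full; the proofs are below) =====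
def Claim_equal_max_dim_4D : Prop := ∀ (space : List (Int × Int × Int × Int × String)), Dom_max_dim_4D space → Spec_max_dim_4D space (max_dim_4D space)

-- ===== LEMMAS AND PROOFS =====

-- ===== VERDICT (by name: the statement is the Claim_ definition above) =====
lemma foldA_eq (space : List (Int × Int × Int × Int × String)) :
    ∀ (a b c d : Int),
      space.foldl (fun m (t : Int × Int × Int × Int × String) =>
        if t.2.2.2.2 == "." then m
        else
          ((if t.1 > m.1 then t.1 else m.1),
           (if t.2.1 > m.2.1 then t.2.1 else m.2.1),
           (if t.2.2.1 > m.2.2.1 then t.2.2.1 else m.2.2.1),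
           (if t.2.2.2.1 > m.2.2.2 then t.2.2.2.1 else m.2.2.2))) (a, b, c, d)
      = (((space.filter (fun t => t.2.2.2.2 ≠ ".")).map (·.1)).foldl max a,
         ((space.filter (fun t => t.2.2.2.2 ≠ ".")).map (·.2.1)).foldl max b,
         ((space.filter (fun t => t.2.2.2.2 ≠ ".")).map (·.2.2.1)).foldl max c,
         ((space.filter (fun t => t.2.2.2.2 ≠ ".")).map (·.2.2.2.1)).foldl max d) := by
  induction space with
  | nil => intro a b c d; simp
  | cons h tl ih =>
    intro a b c d
    by_cases hv : h.2.2.2.2 = "."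
    · rw [List.foldl_cons, if_pos (by simp [hv]), List.filter_cons_of_neg (by simp [hv]), ih]
    · rw [List.foldl_cons, if_neg (by simp [hv]), List.filter_cons_of_pos (by simp [hv]), ih]
      have e1 : (if h.1 > a then h.1 else a) = max a h.1 := by split_ifs <;> omega
      have e2 : (if h.2.1 > b then h.2.1 else b) = max b h.2.1 := by split_ifs <;> omega
      have e3 : (if h.2.2.1 > c then h.2.2.1 else c) = max c h.2.2.1 := by split_ifs <;> omega
      have e4 : (if h.2.2.2.1 > d then h.2.2.2.1 else d) = max d h.2.2.2.1 := by split_ifs <;> omega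
      rw [e1, e2, e3, e4]
      simp

theorem max_dim_4D_spec : Claim_equal_max_dim_4D := by
  intro space _
  unfold Spec_max_dim_4D max_dim_4D max_dim_4D_alt axisMax
  rw [foldA_eq]
  simp [List.map_map, Function.comp_def]
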